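-- pv_equiv track=rewrite | github.com/Dospalko/AnnotationTool | backend/routes/extract.py | concat_single_char_sequences
-- ===== SOURCE A (Python) =====
-- def concat_single_char_sequences(text):
--     words = text.split()  # Split the text into words
--     result_words = []  # List to hold the final words for reconstruction
--     buffer = []  # Temporary buffer to hold sequences of single characters
--
--     for word in words:
--         # Check if the word is a single character (not considering punctuation)
--         if len(word) == 1 and word.isalpha():
--             buffer.append(word)  # Add to buffer if it's a single character
--         else:
--             # If buffer has 3 or more characters, concatenate them
--             if len(buffer) >= 3:
--                 result_words.append("".join(buffer))
--                 buffer = []  # Reset buffer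
--             elif buffer:
--                 # If buffer has fewer than 3 characters, add them as separate words
--                 result_words.extend(buffer)
--                 buffer = []  # Reset buffer
--             result_words.append(word)  # Add the current word to the result
--
--     # Check buffer again at the end of the loop to catch any remaining sequences
--     if len(buffer) >= 3:
--         result_words.append("".join(buffer))
--     elif buffer:
--         result_words.extend(buffer)
--
--     return " ".join(result_words)
-- ===== SOURCE B (Python) =====
-- def concat_single_char_sequences(text):
--     words = text.split()
--     out = []
--     i = 0
--     n = len(words)
--     while i < n:
--         w = words[i]
--         if len(w) == 1 and w.isalpha():
--             j = i
--             while j < n and len(words[j]) == 1 and words[j].isalpha():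
--                 j += 1
--             run = words[i:j]
--             if len(run) >= 3:
--                 out.append("".join(run))
--             else:
--                 out.extend(run)
--             i = j
--         else:
--             out.append(w)
--             i += 1
--     return " ".join(out)
-- ===== Notes on version B (the rewrite author's own statement) =====
-- stated objective: alternative
-- what changed: Replaces A's buffer-accumulate-and-flush fold (with a duplicated end-of-loop flush) by a two-pointer run scan: at each single-letter word it scans the whole run at once, emits it joined or spread, and jumps past it, so there is no carried buffer state and no final flush.
import Mathlib
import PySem

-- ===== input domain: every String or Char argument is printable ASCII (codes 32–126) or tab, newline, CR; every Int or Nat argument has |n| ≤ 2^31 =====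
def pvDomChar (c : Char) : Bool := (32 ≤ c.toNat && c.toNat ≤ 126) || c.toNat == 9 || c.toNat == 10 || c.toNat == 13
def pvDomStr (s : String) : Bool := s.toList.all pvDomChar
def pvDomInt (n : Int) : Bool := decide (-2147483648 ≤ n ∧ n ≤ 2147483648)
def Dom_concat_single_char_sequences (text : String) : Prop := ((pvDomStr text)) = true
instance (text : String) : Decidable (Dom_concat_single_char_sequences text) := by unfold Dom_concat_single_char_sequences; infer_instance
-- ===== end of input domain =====

-- B replaces A's carried buffer + duplicated end-of-loop flush by a run scan that consumes each
-- run of single-letter words at once (alternative decomposition, same cost).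

-- the shared word test: len(word) == 1 and word.isalpha()
def pvIsSingle (w : String) : Bool := PySem.Str.len w == 1 && PySem.Str.strIsalpha w

-- ===== PORT A =====
-- the loop body of A: state = (result_words, buffer)
def pvStepA (st : List String × List String) (word : String) : List String × List String :=
  if pvIsSingle word then
    (st.1, st.2 ++ [word])
  else
    let r := if st.2.length ≥ 3 then st.1 ++ [PySem.Str.join "" st.2] else st.1 ++ st.2
    (r ++ [word], [])

def concat_single_char_sequences (text : String) : String :=
  let words := PySem.Str.split₀ text
  let st := words.foldl pvStepA ([], [])
  let result := if st.2.length ≥ 3 then st.1 ++ [PySem.Str.join "" st.2] else st.1 ++ st.2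
  PySem.Str.join " " result

-- ===== PORT B =====
-- B's outer while loop: at a single-letter word scan its whole run (the inner while) and jump past it
def pvAltGo : List String → List String
  | [] => []
  | w :: ws =>
    if pvIsSingle w then
      let run := w :: ws.takeWhile pvIsSingle
      (if run.length ≥ 3 then [PySem.Str.join "" run] else run) ++ pvAltGo (ws.dropWhile pvIsSingle)
    else
      w :: pvAltGo ws
termination_by ws => ws.length
decreasing_by
  · exact Nat.lt_succ_of_le (List.length_dropWhile_le _ _)
  · exact Nat.lt_succ_self _

def concat_single_char_sequences_alt (text : String) : String :=
  PySem.Str.join " " (pvAltGo (PySem.Str.split₀ text))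

-- ===== PRECONDITION & SPEC =====
def Spec_concat_single_char_sequences (text : String) (out : String) : Prop := out = concat_single_char_sequences_alt text
instance (text : String) (out : String) : Decidable (Spec_concat_single_char_sequences text out) := by unfold Spec_concat_single_char_sequences; infer_instance

-- ===== CLAIM (what is proved, stated in full; the proofs are below) =====
def Claim_equal_concat_single_char_sequences : Prop := ∀ (text : String), Dom_concat_single_char_sequences text → Spec_concat_single_char_sequences text (concat_single_char_sequences text)

-- ===== LEMMAS AND PROOFS =====

-- flushing a buffer b: joined if it has ≥ 3 members, spread otherwise
def pvEmit (b : List String) : List String :=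
  if b.length ≥ 3 then [PySem.Str.join "" b] else b

-- abstract description of A's remaining computation: buffer b pending, words ws left
def pvF (b : List String) : List String → List String
  | [] => pvEmit b
  | w :: ws => if pvIsSingle w then pvF (b ++ [w]) ws else pvEmit b ++ [w] ++ pvF [] ws

lemma pvFoldA_eq (ws : List String) : ∀ (r b : List String),
    (let st := ws.foldl pvStepA (r, b)
     if st.2.length ≥ 3 then st.1 ++ [PySem.Str.join "" st.2] else st.1 ++ st.2)
    = r ++ pvF b ws := by
  induction ws with
  | nil => intro r b; simp [pvF, pvEmit]; split_ifs <;> simp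
  | cons w ws ih =>
    intro r b
    simp only [List.foldl_cons, pvF, pvStepA]
    by_cases h : pvIsSingle w = true
    · simp [h, ih]
    · simp only [h, if_false, Bool.false_eq_true]
      rw [ih]
      simp [pvEmit]
      split_ifs <;> simp

lemma pvAltGo_run (ws : List String) :
    pvAltGo ws = pvEmit (ws.takeWhile pvIsSingle) ++ pvAltGo (ws.dropWhile pvIsSingle) := by
  match ws with
  | [] => simp [pvAltGo, pvEmit]
  | w :: ws =>
    rw [pvAltGo]
    by_cases h : pvIsSingle w = true
    · simp [h, pvEmit]
    · simp [h, pvEmit, pvAltGo]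

lemma pvF_eq (ws : List String) : ∀ (b : List String),
    pvF b ws = pvEmit (b ++ ws.takeWhile pvIsSingle) ++ pvAltGo (ws.dropWhile pvIsSingle) := by
  induction ws with
  | nil => intro b; simp [pvF, pvAltGo]
  | cons w ws ih =>
    intro b
    by_cases h : pvIsSingle w = true
    · rw [pvF]
      simp only [if_true, ih (b ++ [w]), List.takeWhile_cons, List.dropWhile_cons, h,
        List.append_assoc, List.cons_append, List.nil_append]
    · rw [pvF]
      simp only [h, Bool.false_eq_true, if_false, List.takeWhile_cons, List.dropWhile_cons]
      simp only [List.append_nil]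
      rw [ih []]
      simp only [List.nil_append]
      rw [← pvAltGo_run ws]
      have e : pvAltGo (w :: ws) = w :: pvAltGo ws := by rw [pvAltGo]; simp [h]
      rw [e]
      simp

-- ===== VERDICT (by name: the statement is the Claim_ definition above) =====
theorem concat_single_char_sequences_spec : Claim_equal_concat_single_char_sequences := by
  intro text _
  unfold Spec_concat_single_char_sequences concat_single_char_sequences concat_single_char_sequences_alt
  have h := pvFoldA_eq (PySem.Str.split₀ text) [] []
  simp only at h ⊢
  rw [h, pvF_eq]
  simp only [List.nil_append]
  rw [← pvAltGo_run]
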